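-- pv_equiv track=rewrite | github.com/harryboos/nmt-transformer | test.py | class_data
-- ===== SOURCE A (Python) =====
-- def find_len(element):
--     result = 0
--     for item in element:
--         if len(item.split()) > result:
--             result = len(item.split())
--     return result
--
-- def correspond_len(pair, thres):
--     le = find_len(pair)
--     if le < thres[0]-3:
--         return thres[0]
--     for i in range(len(thres)):
--         if i == len(thres)-1:
--             return None
--         if le > (thres[i]-3) and le < (thres[i+1]-3):
--             return thres[i+1]
--
-- def class_data(data_pairs):
--     threshold = [20, 40, 60, 80, 100, 200]
--     class_pairs = []
--     for i in range(len(threshold)):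
--         class_pairs.append([])
--     for pair in data_pairs:
--         pair_len = correspond_len(pair, threshold)
--         if pair_len is None:
--             continue
--         class_pairs[threshold.index(pair_len)].append(pair)
--
--     return class_pairs, threshold
-- ===== SOURCE B (Python) =====
-- def class_data(data_pairs):
--     threshold = [20, 40, 60, 80, 100, 200]
--
--     def pair_len(pair):
--         return max((len(item.split()) for item in pair), default=0)
--
--     lower = [-1] + [t - 3 for t in threshold[:-1]]
--     class_pairs = [[pair for pair in data_pairs
--                     if lower[k] < pair_len(pair) < threshold[k] - 3]
--                    for k in range(len(threshold))]
--     return class_pairs, threshold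
-- ===== Notes on version B (the rewrite author's own statement) =====
-- stated objective: alternative
-- what changed: B builds the result by six independent range-filter passes over the data (a per-bucket comprehension with a precomputed lower-bound list), instead of A's single routing loop that walks the threshold list per pair, looks the class up with threshold.index and appends into a mutable bucket array.
import Mathlib
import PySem

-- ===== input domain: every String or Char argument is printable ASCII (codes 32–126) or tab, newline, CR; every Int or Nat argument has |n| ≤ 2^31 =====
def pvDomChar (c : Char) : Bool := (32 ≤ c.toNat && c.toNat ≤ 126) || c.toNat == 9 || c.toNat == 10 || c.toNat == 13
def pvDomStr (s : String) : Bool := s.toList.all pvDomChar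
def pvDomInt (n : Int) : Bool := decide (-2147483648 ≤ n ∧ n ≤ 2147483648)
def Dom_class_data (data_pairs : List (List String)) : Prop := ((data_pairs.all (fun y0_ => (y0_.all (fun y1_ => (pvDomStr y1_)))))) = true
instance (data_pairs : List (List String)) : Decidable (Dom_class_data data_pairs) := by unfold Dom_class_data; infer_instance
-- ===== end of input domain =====

-- B builds the six buckets by independent per-bucket range filters over the data
-- instead of A's single routing loop with a per-pair threshold scan and index lookup.

-- ===== PORT A =====
def find_len (element : List String) : Nat :=
  element.foldl (fun result item =>
    if (PySem.Str.split₀ item).length > result then (PySem.Str.split₀ item).length else result) 0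

-- the 'for i in range(len(thres))' loop of correspond_len; [] => none is Python falling
-- off the end of the function (returning None).  thres indexing is via pyGetD with
-- default 0; in every call thres is the 6-element threshold list and i, i+1 are in
-- range on every path Python reaches (i = len-1 returns before thres[i+1] is read),
-- so the port is exact there.
def correspond_len_loop (le : Int) (thres : List Int) : List Int → Option Int
  | [] => none
  | i :: rest =>
    if i = (thres.length : Int) - 1 then none
    else if le > PySem.List.pyGetD thres i 0 - 3 ∧ le < PySem.List.pyGetD thres (i+1) 0 - 3 then
      some (PySem.List.pyGetD thres (i+1) 0)
    else correspond_len_loop le thres rest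

def correspond_len (pair : List String) (thres : List Int) : Option Int :=
  let le : Int := (find_len pair : Nat)
  if le < PySem.List.pyGetD thres 0 0 - 3 then some (PySem.List.pyGetD thres 0 0)
  else correspond_len_loop le thres (PySem.List.pyRange 0 (thres.length : Int) 1)

-- the body of A's classification loop (the fold over data_pairs)
def class_data_loop (cp : List (List (List String))) (pair : List String) : List (List (List String)) :=
  match correspond_len pair [20, 40, 60, 80, 100, 200] with
  | none => cp
  | some pair_len =>
    -- class_pairs[threshold.index(pair_len)].append(pair); index? none = ValueError,
    -- unreachable: correspond_len only returns elements of threshold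
    match PySem.List.index? [20, 40, 60, 80, 100, 200] pair_len with
    | none => cp
    | some idx => cp.modify idx (fun l => l ++ [pair])

def class_data (data_pairs : List (List String)) : List (List (List String)) × List Int :=
  let threshold : List Int := [20, 40, 60, 80, 100, 200]
  let class_pairs : List (List (List String)) :=
    (PySem.List.pyRange 0 (threshold.length : Int) 1).foldl (fun acc _ => acc ++ [[]]) []
  (data_pairs.foldl class_data_loop class_pairs, threshold)

-- ===== PORT B =====
-- max((len(item.split()) for item in pair), default=0)
def pair_len (pair : List String) : Int :=
  ((pair.map (fun item => (PySem.Str.split₀ item).length)).foldl max 0 : Nat)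

-- six independent range-filter passes; lower[k] and threshold[k] are indexed with
-- pyGetD default 0, always in range since k ranges over range(len(threshold))
def class_data_alt (data_pairs : List (List String)) : List (List (List String)) × List Int :=
  let threshold : List Int := [20, 40, 60, 80, 100, 200]
  let lower : List Int := -1 :: (PySem.List.slice threshold none (some (-1))).map (fun t => t - 3)
  let class_pairs := (PySem.List.pyRange 0 (threshold.length : Int) 1).map (fun k =>
    data_pairs.filter (fun pair =>
      decide (PySem.List.pyGetD lower k 0 < pair_len pair) &&
      decide (pair_len pair < PySem.List.pyGetD threshold k 0 - 3)))
  (class_pairs, threshold)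

-- ===== PRECONDITION & SPEC =====
def Spec_class_data (data_pairs : List (List String)) (out : List (List (List String)) × List Int) : Prop := out = class_data_alt data_pairs
instance (data_pairs : List (List String)) (out : List (List (List String)) × List Int) : Decidable (Spec_class_data data_pairs out) := by unfold Spec_class_data; infer_instance

-- ===== CLAIM (what is proved, stated in full; the proofs are below) =====
def Claim_equal_class_data : Prop := ∀ (data_pairs : List (List String)), Dom_class_data data_pairs → Spec_class_data data_pairs (class_data data_pairs)

-- ===== LEMMAS AND PROOFS =====

-- proof-side bucket classifier: the interval a pair length falls into (none = dropped)
def bucketOf (le : Int) : Option Nat :=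
  if le < 17 then some 0
  else if 17 < le ∧ le < 37 then some 1
  else if 37 < le ∧ le < 57 then some 2
  else if 57 < le ∧ le < 77 then some 3
  else if 77 < le ∧ le < 97 then some 4
  else if 97 < le ∧ le < 197 then some 5
  else none

lemma bucketOf_lt (le : Int) (k : Nat) (h : bucketOf le = some k) : k < 6 := by
  unfold bucketOf at h; split_ifs at h <;> simp_all <;> omega

lemma find_len_eq (pair : List String) : ((find_len pair : Nat) : Int) = pair_len pair := by
  unfold find_len pair_len
  congr 1
  suffices h : ∀ acc : Nat,
      pair.foldl (fun result item =>
        if (PySem.Str.split₀ item).length > result then (PySem.Str.split₀ item).length else result) acc =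
      (pair.map (fun item => (PySem.Str.split₀ item).length)).foldl max acc from h 0
  intro acc
  induction pair generalizing acc with
  | nil => rfl
  | cons x xs ih =>
    simp only [List.foldl, List.map]
    rw [show (if (PySem.Str.split₀ x).length > acc then (PySem.Str.split₀ x).length else acc)
        = max acc (PySem.Str.split₀ x).length from by split <;> omega]
    exact ih _

-- A's per-pair routing equals the interval classifier
set_option maxHeartbeats 1000000 in
lemma stepA (cp : List (List (List String))) (pair : List String) :
    class_data_loop cp pair =
      match bucketOf ((find_len pair : Nat) : Int) with
      | none => cp
      | some k => cp.modify k (fun l => l ++ [pair]) := by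
  unfold class_data_loop correspond_len
  set le : Int := ((find_len pair : Nat) : Int) with hledef
  have hle0 : 0 ≤ le := by positivity
  clear_value le
  have hrange : PySem.List.pyRange 0 (([20, 40, 60, 80, 100, 200] : List Int).length : Int) 1
      = [0, 1, 2, 3, 4, 5] := by decide
  rw [hrange]
  have e0 : PySem.List.pyGetD ([20, 40, 60, 80, 100, 200] : List Int) 0 0 = 20 := by decide
  have e1 : PySem.List.pyGetD ([20, 40, 60, 80, 100, 200] : List Int) 1 0 = 40 := by decide
  have e2 : PySem.List.pyGetD ([20, 40, 60, 80, 100, 200] : List Int) 2 0 = 60 := by decide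
  have e3 : PySem.List.pyGetD ([20, 40, 60, 80, 100, 200] : List Int) 3 0 = 80 := by decide
  have e4 : PySem.List.pyGetD ([20, 40, 60, 80, 100, 200] : List Int) 4 0 = 100 := by decide
  have e5 : PySem.List.pyGetD ([20, 40, 60, 80, 100, 200] : List Int) 5 0 = 200 := by decide
  simp only [correspond_len_loop]
  norm_num [e0, e1, e2, e3, e4, e5]
  rcases lt_trichotomy le 17 with h0 | h0 | h0
  · simp [bucketOf, List.idxOf?, List.findIdx?_cons, List.findIdx?_nil,
      show le < (17:Int) from h0,
      show ¬((17:Int) < le) from by omega, show ¬((17:Int) < le ∧ le < 37) from by omega,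
      show ¬((37:Int) < le) from by omega, show le < (37:Int) from by omega,
      show ¬((57:Int) < le) from by omega, show le < (57:Int) from by omega,
      show ¬((77:Int) < le) from by omega, show le < (77:Int) from by omega,
      show ¬((97:Int) < le) from by omega, show le < (97:Int) from by omega,
      show ¬((197:Int) < le) from by omega, show le < (197:Int) from by omega]
  · subst h0
    norm_num [bucketOf, List.idxOf?, List.findIdx?_cons, List.findIdx?_nil]
  rcases lt_trichotomy le 37 with h1 | h1 | h1
  · simp [bucketOf, List.idxOf?, List.findIdx?_cons, List.findIdx?_nil,
      show ¬(le < (17:Int)) from by omega, show ((17:Int) < le) from by omega,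
      show le < (37:Int) from h1, show ¬((37:Int) < le) from by omega,
      show ¬((57:Int) < le) from by omega, show le < (57:Int) from by omega,
      show ¬((77:Int) < le) from by omega, show le < (77:Int) from by omega,
      show ¬((97:Int) < le) from by omega, show le < (97:Int) from by omega,
      show ¬((197:Int) < le) from by omega, show le < (197:Int) from by omega]
  · subst h1
    norm_num [bucketOf, List.idxOf?, List.findIdx?_cons, List.findIdx?_nil]
  rcases lt_trichotomy le 57 with h2 | h2 | h2
  · simp [bucketOf, List.idxOf?, List.findIdx?_cons, List.findIdx?_nil,
      show ¬(le < (17:Int)) from by omega, show ((17:Int) < le) from by omega,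
      show ¬(le < (37:Int)) from by omega, show ((37:Int) < le) from by omega,
      show le < (57:Int) from h2, show ¬((57:Int) < le) from by omega,
      show ¬((77:Int) < le) from by omega, show le < (77:Int) from by omega,
      show ¬((97:Int) < le) from by omega, show le < (97:Int) from by omega,
      show ¬((197:Int) < le) from by omega, show le < (197:Int) from by omega]
  · subst h2
    norm_num [bucketOf, List.idxOf?, List.findIdx?_cons, List.findIdx?_nil]
  rcases lt_trichotomy le 77 with h3 | h3 | h3
  · simp [bucketOf, List.idxOf?, List.findIdx?_cons, List.findIdx?_nil,
      show ¬(le < (17:Int)) from by omega, show ((17:Int) < le) from by omega,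
      show ¬(le < (37:Int)) from by omega, show ((37:Int) < le) from by omega,
      show ¬(le < (57:Int)) from by omega, show ((57:Int) < le) from by omega,
      show le < (77:Int) from h3, show ¬((77:Int) < le) from by omega,
      show ¬((97:Int) < le) from by omega, show le < (97:Int) from by omega,
      show ¬((197:Int) < le) from by omega, show le < (197:Int) from by omega]
  · subst h3
    norm_num [bucketOf, List.idxOf?, List.findIdx?_cons, List.findIdx?_nil]
  rcases lt_trichotomy le 97 with h4 | h4 | h4
  · simp [bucketOf, List.idxOf?, List.findIdx?_cons, List.findIdx?_nil,
      show ¬(le < (17:Int)) from by omega, show ((17:Int) < le) from by omega,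
      show ¬(le < (37:Int)) from by omega, show ((37:Int) < le) from by omega,
      show ¬(le < (57:Int)) from by omega, show ((57:Int) < le) from by omega,
      show ¬(le < (77:Int)) from by omega, show ((77:Int) < le) from by omega,
      show le < (97:Int) from h4, show ¬((97:Int) < le) from by omega,
      show ¬((197:Int) < le) from by omega, show le < (197:Int) from by omega]
  · subst h4
    norm_num [bucketOf, List.idxOf?, List.findIdx?_cons, List.findIdx?_nil]
  rcases lt_trichotomy le 197 with h5 | h5 | h5
  · simp [bucketOf, List.idxOf?, List.findIdx?_cons, List.findIdx?_nil,
      show ¬(le < (17:Int)) from by omega, show ((17:Int) < le) from by omega,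
      show ¬(le < (37:Int)) from by omega, show ((37:Int) < le) from by omega,
      show ¬(le < (57:Int)) from by omega, show ((57:Int) < le) from by omega,
      show ¬(le < (77:Int)) from by omega, show ((77:Int) < le) from by omega,
      show ¬(le < (97:Int)) from by omega, show ((97:Int) < le) from by omega,
      show le < (197:Int) from h5, show ¬((197:Int) < le) from by omega]
  · subst h5
    norm_num [bucketOf, List.idxOf?, List.findIdx?_cons, List.findIdx?_nil]
  simp [bucketOf, List.idxOf?, List.findIdx?_cons, List.findIdx?_nil,
      show ¬(le < (17:Int)) from by omega, show ((17:Int) < le) from by omega,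
      show ¬(le < (37:Int)) from by omega, show ((37:Int) < le) from by omega,
      show ¬(le < (57:Int)) from by omega, show ((57:Int) < le) from by omega,
      show ¬(le < (77:Int)) from by omega, show ((77:Int) < le) from by omega,
      show ¬(le < (97:Int)) from by omega, show ((97:Int) < le) from by omega,
      show ¬(le < (197:Int)) from by omega, show ((197:Int) < le) from by omega]

-- A's whole fold over six buckets is six bucket-filters appended to the accumulators
lemma fold_eq (ps : List (List String)) (c0 c1 c2 c3 c4 c5 : List (List String)) :
    ps.foldl class_data_loop [c0, c1, c2, c3, c4, c5] =
      [c0 ++ ps.filter (fun p => bucketOf ((find_len p : Nat) : Int) == some 0),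
       c1 ++ ps.filter (fun p => bucketOf ((find_len p : Nat) : Int) == some 1),
       c2 ++ ps.filter (fun p => bucketOf ((find_len p : Nat) : Int) == some 2),
       c3 ++ ps.filter (fun p => bucketOf ((find_len p : Nat) : Int) == some 3),
       c4 ++ ps.filter (fun p => bucketOf ((find_len p : Nat) : Int) == some 4),
       c5 ++ ps.filter (fun p => bucketOf ((find_len p : Nat) : Int) == some 5)] := by
  induction ps generalizing c0 c1 c2 c3 c4 c5 with
  | nil => simp
  | cons p ps ih =>
    simp only [List.foldl]
    rw [stepA]
    rcases hb : bucketOf ((find_len p : Nat) : Int) with _ | k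
    · simp [List.filter_cons, hb, ih]
    · have hk : k < 6 := bucketOf_lt _ _ hb
      interval_cases k <;>
        simp [List.modify, hb, List.filter_cons, ih, List.append_assoc]

-- B-predicate = bucket-predicate, per bucket, for nonnegative lengths
lemma b0 (le : Int) (h : 0 ≤ le) :
    (decide ((-1:Int) < le) && decide (le < 17)) = (bucketOf le == some 0) := by
  unfold bucketOf; split_ifs <;> simp <;> omega
lemma b1 (le : Int) (h : 0 ≤ le) :
    (decide ((17:Int) < le) && decide (le < 37)) = (bucketOf le == some 1) := by
  unfold bucketOf; split_ifs <;> simp <;> omega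
lemma b2 (le : Int) (h : 0 ≤ le) :
    (decide ((37:Int) < le) && decide (le < 57)) = (bucketOf le == some 2) := by
  unfold bucketOf; split_ifs <;> simp <;> omega
lemma b3 (le : Int) (h : 0 ≤ le) :
    (decide ((57:Int) < le) && decide (le < 77)) = (bucketOf le == some 3) := by
  unfold bucketOf; split_ifs <;> simp <;> omega
lemma b4 (le : Int) (h : 0 ≤ le) :
    (decide ((77:Int) < le) && decide (le < 97)) = (bucketOf le == some 4) := by
  unfold bucketOf; split_ifs <;> simp <;> omega
lemma b5 (le : Int) (h : 0 ≤ le) :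
    (decide ((97:Int) < le) && decide (le < 197)) = (bucketOf le == some 5) := by
  unfold bucketOf; split_ifs <;> simp <;> omega

-- B's result, written out (the range/slice/pyGetD over the literal lists reduce)
lemma alt_eq (dp : List (List String)) :
    class_data_alt dp =
      ([dp.filter (fun p => decide ((-1:Int) < pair_len p) && decide (pair_len p < 17)),
        dp.filter (fun p => decide ((17:Int) < pair_len p) && decide (pair_len p < 37)),
        dp.filter (fun p => decide ((37:Int) < pair_len p) && decide (pair_len p < 57)),
        dp.filter (fun p => decide ((57:Int) < pair_len p) && decide (pair_len p < 77)),
        dp.filter (fun p => decide ((77:Int) < pair_len p) && decide (pair_len p < 97)),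
        dp.filter (fun p => decide ((97:Int) < pair_len p) && decide (pair_len p < 197))],
       [20, 40, 60, 80, 100, 200]) := rfl

-- ===== VERDICT (by name: the statement is the Claim_ definition above) =====
theorem class_data_spec : Claim_equal_class_data := by
  intro dp hdom
  unfold Spec_class_data class_data
  simp only []
  rw [show (PySem.List.pyRange 0 ((([20, 40, 60, 80, 100, 200] : List Int)).length : Int) 1).foldl
      (fun acc _ => acc ++ [[]]) ([] : List (List (List String))) = [[], [], [], [], [], []] from rfl]
  rw [fold_eq, alt_eq]
  simp only [List.nil_append]
  congr 1
  congr 1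
  · exact (List.filter_congr (fun p _ => by
      rw [← find_len_eq]; exact b0 _ (Int.natCast_nonneg _))).symm
  congr 1
  · exact (List.filter_congr (fun p _ => by
      rw [← find_len_eq]; exact b1 _ (Int.natCast_nonneg _))).symm
  congr 1
  · exact (List.filter_congr (fun p _ => by
      rw [← find_len_eq]; exact b2 _ (Int.natCast_nonneg _))).symm
  congr 1
  · exact (List.filter_congr (fun p _ => by
      rw [← find_len_eq]; exact b3 _ (Int.natCast_nonneg _))).symm
  congr 1
  · exact (List.filter_congr (fun p _ => by
      rw [← find_len_eq]; exact b4 _ (Int.natCast_nonneg _))).symm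
  congr 1
  · exact (List.filter_congr (fun p _ => by
      rw [← find_len_eq]; exact b5 _ (Int.natCast_nonneg _))).symm
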